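-- pv_equiv track=rewrite | github.com/MannLabs/alphaquant | alphaquant/cluster/cluster_utils.py | exchange_cluster_idxs
-- ===== SOURCE A (Python) =====
-- def exchange_cluster_idxs(fclust_output_array):
--     """The fcluster output assigns cluster numbers to the clustered elems, e.g. [1,2,1,2,2,2].
--     This function here ensures that the numbers follow size of the cluster, e.g. [1,0,1,0,0,0]"""
--     clustnum2count = {}
--     for clustnum in fclust_output_array:
--         clustnum2count[clustnum] = clustnum2count.get(clustnum, 0)+1
--     clustnums = list(clustnum2count.keys())
--     clustnums.sort(key = lambda x : clustnum2count.get(x), reverse= True)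
--     clustnum_old2clustnum_new = {clustnums[idx]: idx for idx in range(len(clustnums))}
--     return [clustnum_old2clustnum_new.get(clustnum) for clustnum in fclust_output_array]
-- ===== SOURCE B (Python) =====
-- def exchange_cluster_idxs(fclust_output_array):
--     counts = {}
--     for c in fclust_output_array:
--         counts[c] = counts.get(c, 0) + 1
--     buckets = {}
--     for c in counts:
--         buckets.setdefault(counts[c], []).append(c)
--     maxc = max(counts.values(), default=0)
--     mapping = {}
--     nxt = 0
--     for sz in range(maxc, 0, -1):
--         for c in buckets.get(sz, []):
--             mapping[c] = nxt
--             nxt += 1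
--     return [mapping[c] for c in fclust_output_array]
-- ===== Notes on version B (the rewrite author's own statement) =====
-- stated objective: alternative
-- what changed: B replaces A's comparison sort of cluster labels by count with a count-indexed bucket table filled in first-appearance order plus a single descending scan over the counts that assigns the new labels.
import Mathlib
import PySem

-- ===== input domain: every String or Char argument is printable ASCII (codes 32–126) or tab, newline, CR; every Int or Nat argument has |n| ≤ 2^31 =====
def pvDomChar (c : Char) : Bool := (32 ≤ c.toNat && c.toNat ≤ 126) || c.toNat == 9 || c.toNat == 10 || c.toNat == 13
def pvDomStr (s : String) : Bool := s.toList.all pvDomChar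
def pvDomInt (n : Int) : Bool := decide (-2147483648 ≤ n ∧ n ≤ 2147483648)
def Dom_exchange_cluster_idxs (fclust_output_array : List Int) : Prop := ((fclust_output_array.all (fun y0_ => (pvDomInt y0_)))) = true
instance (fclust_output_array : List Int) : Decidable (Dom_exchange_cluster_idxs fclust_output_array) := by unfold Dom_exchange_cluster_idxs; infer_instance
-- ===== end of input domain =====

-- B replaces A's comparison sort of the cluster labels by a count-indexed bucket table
-- filled in first-appearance order plus a descending scan over the counts (objective: alternative).

-- ===== PORT A =====
-- literal port of A; `clustnum2count.get(x)` / `clustnum_old2clustnum_new.get(c)` are ported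
-- as `getD _ 0`: the keys are always present there, so the default is never used.
def exchange_cluster_idxs (fclust_output_array : List Int) : List Int :=
  let clustnum2count : PySem.Dict Int Int :=
    fclust_output_array.foldl (fun d c => d.insert c (d.getD c 0 + 1)) PySem.Dict.empty
  let clustnums : List Int :=
    PySem.List.sorted clustnum2count.keys (fun x => clustnum2count.getD x 0) true
  let clustnum_old2clustnum_new : PySem.Dict Int Int :=
    (PySem.List.pyRange 0 (PySem.List.len clustnums)).foldl
      (fun m idx => m.insert (PySem.List.pyGetD clustnums idx 0) idx) PySem.Dict.empty
  fclust_output_array.map (fun c => clustnum_old2clustnum_new.getD c 0)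

-- ===== PORT B =====
-- port of Source B; `buckets.setdefault(counts[c], []).append(c)` is the in-place append ported as
-- `modify _ [] (· ++ [c])`; `mapping[c]` is `getD _ 0` (every element of the input is a key).
def exchange_cluster_idxs_alt (fclust_output_array : List Int) : List Int :=
  let counts : PySem.Dict Int Int :=
    fclust_output_array.foldl (fun d c => d.insert c (d.getD c 0 + 1)) PySem.Dict.empty
  let buckets : PySem.Dict Int (List Int) :=
    counts.keys.foldl (fun b c => b.modify (counts.getD c 0) [] (· ++ [c])) PySem.Dict.empty
  let maxc : Int := PySem.List.maxD counts.values (fun v => v) 0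
  let st : PySem.Dict Int Int × Int :=
    (PySem.List.pyRange maxc 0 (-1)).foldl
      (fun st sz => (buckets.getD sz []).foldl
        (fun (st : PySem.Dict Int Int × Int) c => (st.1.insert c st.2, st.2 + 1)) st)
      (PySem.Dict.empty, 0)
  fclust_output_array.map (fun c => st.1.getD c 0)

-- ===== PRECONDITION & SPEC =====
def Spec_exchange_cluster_idxs (fclust_output_array : List Int) (out : List Int) : Prop := out = exchange_cluster_idxs_alt fclust_output_array
instance (fclust_output_array : List Int) (out : List Int) : Decidable (Spec_exchange_cluster_idxs fclust_output_array out) := by unfold Spec_exchange_cluster_idxs; infer_instance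

-- ===== CLAIM (what is proved, stated in full; the proofs are below) =====
def Claim_equal_exchange_cluster_idxs : Prop := ∀ (fclust_output_array : List Int), Dom_exchange_cluster_idxs fclust_output_array → Spec_exchange_cluster_idxs fclust_output_array (exchange_cluster_idxs fclust_output_array)

-- ===== LEMMAS AND PROOFS =====

theorem pv_insertBy_cons (before : Int → Int → Bool) (x y : Int) (ys : List Int) :
    PySem.List.insertBy before x (y :: ys)
      = if before x y then x :: y :: ys else y :: PySem.List.insertBy before x ys := by
  simp [PySem.List.insertBy]

theorem pv_insertBy_append (before : Int → Int → Bool) (x : Int) (A B : List Int)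
    (hA : ∀ y ∈ A, before x y = false) :
    PySem.List.insertBy before x (A ++ B) = A ++ PySem.List.insertBy before x B := by
  induction A with
  | nil => simp
  | cons a A ih =>
      have ha : before x a = false := hA a (by simp)
      rw [List.cons_append, pv_insertBy_cons, ha]
      simp [ih (fun y hy => hA y (by simp [hy]))]

theorem pv_insertBy_front (before : Int → Int → Bool) (x : Int) (B : List Int)
    (hB : ∀ y ∈ B, before x y = true) :
    PySem.List.insertBy before x B = x :: B := by
  cases B with
  | nil => rfl
  | cons b B => simp [pv_insertBy_cons, hB b (by simp)]

-- inserting x into a list of buckets concatenated in strictly-descending key order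
-- appends x at the end of its own bucket
theorem pv_ins_flatMap (key : Int → Int) (x : Int) (ds L : List Int)
    (hds : ds.Pairwise (· > ·)) (hx : key x ∈ ds) :
    PySem.List.insertBy (fun a b => decide (key b < key a)) x
        (ds.flatMap (fun v => L.filter (fun c => key c == v)))
      = ds.flatMap (fun v => (L ++ [x]).filter (fun c => key c == v)) := by
  induction ds with
  | nil => simp at hx
  | cons d ds ih =>
      rw [List.pairwise_cons] at hds
      obtain ⟨hd, hds'⟩ := hds
      have hfilt : ∀ v : Int, key x ≠ v →
          (L ++ [x]).filter (fun c => key c == v) = L.filter (fun c => key c == v) := by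
        intro v hv; simp [List.filter_append, hv]
      rcases (by simpa using hx : key x = d ∨ key x ∈ ds) with hxd | hxds
      · -- x belongs to the first bucket: it goes right after it
        have hA : ∀ y ∈ L.filter (fun c => key c == d), (fun a b => decide (key b < key a)) x y = false := by
          intro y hy
          have := List.of_mem_filter hy
          simp only [beq_iff_eq] at this
          simp [this, hxd]
        have hB : ∀ y ∈ ds.flatMap (fun v => L.filter (fun c => key c == v)),
            (fun a b => decide (key b < key a)) x y = true := by
          intro y hy
          obtain ⟨v, hv, hyv⟩ := List.mem_flatMap.mp hy
          have := List.of_mem_filter hyv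
          simp only [beq_iff_eq] at this
          simp [this, hxd]
          exact hd v hv
        rw [List.flatMap_cons, pv_insertBy_append _ _ _ _ hA, pv_insertBy_front _ _ _ hB,
            List.flatMap_cons]
        have h1 : (L ++ [x]).filter (fun c => key c == d)
            = L.filter (fun c => key c == d) ++ [x] := by
          simp [List.filter_append, hxd]
        rw [h1]
        have h2 : ds.flatMap (fun v => (L ++ [x]).filter (fun c => key c == v))
            = ds.flatMap (fun v => L.filter (fun c => key c == v)) := by
          apply List.flatMap_congr
          intro v hv
          exact hfilt v (by rw [hxd]; exact ne_of_gt (hd v hv))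
        rw [h2]; simp
      · -- x belongs to a later bucket: skip the first one
        have hxlt : key x < d := hd _ hxds
        have hA : ∀ y ∈ L.filter (fun c => key c == d), (fun a b => decide (key b < key a)) x y = false := by
          intro y hy
          have := List.of_mem_filter hy
          simp only [beq_iff_eq] at this
          simp [this]; omega
        rw [List.flatMap_cons, pv_insertBy_append _ _ _ _ hA, ih hds' hxds,
            List.flatMap_cons, hfilt d (by omega)]

-- Python's stable descending sort by key equals the bucket concatenation, for any
-- strictly-descending list ds of key values covering all keys occurring in L
theorem pv_sort_buckets (key : Int → Int) (ds : List Int)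
    (hds : ds.Pairwise (· > ·)) (L : List Int) (hmem : ∀ c ∈ L, key c ∈ ds) :
    PySem.List.sorted L key true = ds.flatMap (fun v => L.filter (fun c => key c == v)) := by
  induction L using List.reverseRecOn with
  | nil => rw [PySem.List.sorted_rev_eq_foldl_insertBy]; simp
  | append_singleton L x ih =>
      rw [PySem.List.sorted_rev_eq_foldl_insertBy, List.foldl_append, List.foldl_cons,
          List.foldl_nil, ← PySem.List.sorted_rev_eq_foldl_insertBy,
          ih (fun c hc => hmem c (by simp [hc]))]
      exact pv_ins_flatMap key x ds L hds (hmem x (by simp))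

-- the counter loop and a name for its dict
def pvCnt (xs : List Int) : PySem.Dict Int Int :=
  xs.foldl (fun d c => d.insert c (d.getD c 0 + 1)) PySem.Dict.empty

theorem pvCnt_getD (xs : List Int) (v : Int) : (pvCnt xs).getD v 0 = (xs.count v : Int) := by
  simp [pvCnt, PySem.Dict.getD_foldl_insert_add_one, PySem.Dict.getD_empty]

theorem pvCnt_keys (xs : List Int) : (pvCnt xs).keys = PySem.Set.ofList xs := by
  rw [pvCnt, PySem.Dict.keys_foldl_insert]
  simp [PySem.Dict.keys_empty, PySem.Set.update_nil_left]

theorem pvCnt_keys_nodup (xs : List Int) : (pvCnt xs).keys.Nodup := by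
  rw [pvCnt_keys]; exact PySem.Set.nodup_ofList xs

-- the bucket dict is the filter of the key list by count
theorem pv_buckets_getD (xs : List Int) (sz : Int) :
    ((pvCnt xs).keys.foldl (fun b c => b.modify ((pvCnt xs).getD c 0) [] (· ++ [c]))
        PySem.Dict.empty).getD sz []
      = (pvCnt xs).keys.filter (fun c => (pvCnt xs).getD c 0 == sz) := by
  have h : (pvCnt xs).keys.foldl (fun b c => b.modify ((pvCnt xs).getD c 0) [] (· ++ [c]))
        PySem.Dict.empty
      = ((pvCnt xs).keys.map (fun c => ((pvCnt xs).getD c 0, c))).foldl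
          (fun d p => d.modify p.1 [] (· ++ [p.2])) PySem.Dict.empty := by
    rw [List.foldl_map]
  rw [h, PySem.Dict.getD_foldl_modify_append, PySem.Dict.getD_empty, List.filter_map,
      List.map_map]
  simp [Function.comp_def]

-- a counted loop inserting elements with consecutive indices is the enumerate fold
theorem pv_fold_enum (L : List Int) (m0 : PySem.Dict Int Int) (n0 : Int) :
    L.foldl (fun (st : PySem.Dict Int Int × Int) c => (st.1.insert c st.2, st.2 + 1)) (m0, n0)
      = ((PySem.List.enumerate L n0).foldl (fun m p => m.insert p.2 p.1) m0,
          n0 + (L.length : Int)) := by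
  induction L generalizing m0 n0 with
  | nil => simp [PySem.List.enumerate_nil]
  | cons c L ih =>
      rw [List.foldl_cons, ih, PySem.List.enumerate_cons, List.foldl_cons]
      simp only [Prod.mk.injEq, List.length_cons]
      exact ⟨trivial, by push_cast; ring⟩

-- A's dict comprehension over range(len(L)) is the enumerate fold too
theorem pv_A_map_enum (L : List Int) :
    (PySem.List.pyRange 0 (PySem.List.len L)).foldl
        (fun m idx => m.insert (PySem.List.pyGetD L idx 0) idx) PySem.Dict.empty
      = (PySem.List.enumerate L 0).foldl (fun m p => m.insert p.2 p.1) PySem.Dict.empty := by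
  rw [PySem.List.enumerate_eq_map_pyRange L 0, List.foldl_map]

theorem pv_range_desc_pairwise (m : Int) :
    (PySem.List.pyRange m 0 (-1)).Pairwise (· > ·) := by
  rw [PySem.List.pyRange_neg_one_eq_reverse, List.pairwise_reverse]
  exact PySem.List.pairwise_lt_pyRange_one 1 (m + 1)

-- ===== VERDICT (by name: the statement is the Claim_ definition above) =====
theorem exchange_cluster_idxs_spec : Claim_equal_exchange_cluster_idxs := by
  intro xs _hdom
  simp only [Spec_exchange_cluster_idxs, exchange_cluster_idxs, exchange_cluster_idxs_alt]
  rw [show xs.foldl (fun d c => d.insert c (d.getD c 0 + 1)) PySem.Dict.empty = pvCnt xs from rfl]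
  set D := pvCnt xs with hD
  set key : Int → Int := fun c => D.getD c 0 with hkey
  set ks := D.keys with hks
  set maxc : Int := PySem.List.maxD D.values (fun v => v) 0 with hmaxc
  set ds := PySem.List.pyRange maxc 0 (-1) with hds
  -- every key's count lies in [1, maxc]
  have hmem : ∀ c ∈ ks, key c ∈ ds := by
    intro c hc
    have hcx : c ∈ xs := by
      have h := hc; rw [hks, hD, pvCnt_keys] at h
      exact (PySem.Set.mem_ofList xs c).mp h
    have hpos : 0 < key c := by
      have hcount : 0 < xs.count c := List.count_pos_iff.mpr hcx
      show 0 < D.getD c 0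
      rw [hD, pvCnt_getD]; exact_mod_cast hcount
    have hval : key c ∈ D.values := by
      rw [PySem.Dict.values_eq_map_keys D (by rw [hD]; exact pvCnt_keys_nodup xs) 0]
      exact List.mem_map.mpr ⟨c, hc, rfl⟩
    have hle : key c ≤ maxc := by
      rcases h : PySem.List.max? D.values (fun v => v) with _ | m
      · rw [PySem.List.max?_eq_none_iff] at h; rw [h] at hval; simp at hval
      · have := PySem.List.max?_isMax h (key c) hval
        simpa [hmaxc, PySem.List.maxD, h] using this
    rw [hds, PySem.List.mem_pyRange_neg_one]; exact ⟨hpos, hle⟩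
  -- the sorted key list equals the bucket concatenation
  have hsort : PySem.List.sorted ks key true
      = ds.flatMap (fun v => ks.filter (fun c => key c == v)) :=
    pv_sort_buckets key ds (pv_range_desc_pairwise maxc) ks hmem
  -- the bucket dict reads back as the filters
  have hbkt : ∀ sz : Int,
      (ks.foldl (fun b c => b.modify (D.getD c 0) [] (· ++ [c])) PySem.Dict.empty).getD sz []
        = ks.filter (fun c => key c == sz) := by
    intro sz; rw [hks, hD]; exact pv_buckets_getD xs sz
  -- B's nested loop over the buckets is the counted loop over the concatenation
  have hflat : ds.foldl
      (fun st sz => ((ks.foldl (fun b c => b.modify (D.getD c 0) [] (· ++ [c]))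
          PySem.Dict.empty).getD sz []).foldl
        (fun (st : PySem.Dict Int Int × Int) c => (st.1.insert c st.2, st.2 + 1)) st)
      (PySem.Dict.empty, 0)
      = (ds.flatMap (fun v => ks.filter (fun c => key c == v))).foldl
          (fun (st : PySem.Dict Int Int × Int) c => (st.1.insert c st.2, st.2 + 1))
          (PySem.Dict.empty, 0) := by
    rw [List.foldl_flatMap]
    apply PySem.List.foldl_congr_mem
    intro acc sz _
    rw [hbkt sz]
  rw [hflat, ← hsort, pv_fold_enum]
  apply List.map_congr_left
  intro c _
  rw [pv_A_map_enum]
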